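-- pv_equiv track=rewrite | github.com/mmercedes/adventofcode | 2021/day_13.py | horizontal_fold
-- ===== SOURCE A (Python) =====
-- def horizontal_fold(m, l):
--     height, width = len(m), len(m[0])
--     m1 = [[m[j][i] for i in range(width)] for j in range(l)]
--     m2 = [[m[j][i] for i in range(width)] for j in range(l+1, height)]
--
--     if len(m1) >= len(m2):
--         midy = len(m1)
--         for y in range(len(m2)):
--             for x in range(width):
--                 if m2[y][x] == "#":
--                     m1[midy-y-1][x] = "#"
--     return m1
-- ===== SOURCE B (Python) =====
-- def horizontal_fold(m, l):
--     height = len(m)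
--     active = l >= height - l - 1
--     return [["#" if (m[r][x] == "#" or
--                      (active and 2*l - r <= height - 1 and m[2*l - r][x] == "#"))
--              else m[r][x]
--              for x in range(len(m[0]))]
--             for r in range(l)]
-- ===== Notes on version B (the rewrite author's own statement) =====
-- stated objective: simpler
-- what changed: B builds the result in a single comprehension that reads each upper cell and its mirror m[2*l-r][x] directly, instead of materializing upper/lower copies and mutating the upper copy backwards with nested in-place writes.
import Mathlib
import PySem

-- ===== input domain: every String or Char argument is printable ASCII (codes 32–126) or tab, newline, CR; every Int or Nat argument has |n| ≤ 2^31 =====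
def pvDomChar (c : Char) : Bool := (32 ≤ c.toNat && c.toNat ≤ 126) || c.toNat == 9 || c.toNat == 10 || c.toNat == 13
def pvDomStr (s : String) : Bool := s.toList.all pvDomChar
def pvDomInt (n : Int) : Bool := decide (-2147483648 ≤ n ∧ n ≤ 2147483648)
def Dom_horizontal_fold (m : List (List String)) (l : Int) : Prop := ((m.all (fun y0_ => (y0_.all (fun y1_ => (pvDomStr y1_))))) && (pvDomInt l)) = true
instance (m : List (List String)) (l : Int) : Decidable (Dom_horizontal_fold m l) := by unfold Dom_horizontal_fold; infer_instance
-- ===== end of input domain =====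

-- B builds the l output rows in one comprehension reading each cell's mirror m[2l-r][x] directly,
-- instead of materializing upper/lower copies and back-writing '#' marks into the upper copy (objective: simpler).


-- ===== PORT A =====
def horizontal_fold (m : List (List String)) (l : Int) : List (List String) :=
  let height : Int := m.length
  let width : Int := (PySem.List.pyGetD m 0 []).length
  let m1 := (PySem.List.pyRange 0 l 1).map (fun j =>
    (PySem.List.pyRange 0 width 1).map (fun i => PySem.List.pyGetD (PySem.List.pyGetD m j []) i ""))
  let m2 := (PySem.List.pyRange (l+1) height 1).map (fun j =>
    (PySem.List.pyRange 0 width 1).map (fun i => PySem.List.pyGetD (PySem.List.pyGetD m j []) i ""))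
  if m1.length ≥ m2.length then
    let midy : Int := m1.length
    (PySem.List.pyRange 0 (m2.length : Int) 1).foldl (fun acc y =>
      (PySem.List.pyRange 0 width 1).foldl (fun acc2 x =>
        if PySem.List.pyGetD (PySem.List.pyGetD m2 y []) x "" = "#" then
          PySem.List.pySetD acc2 (midy - y - 1)
            (PySem.List.pySetD (PySem.List.pyGetD acc2 (midy - y - 1) []) x "#")
        else acc2) acc) m1
  else m1

-- ===== PORT B =====
def horizontal_fold_alt (m : List (List String)) (l : Int) : List (List String) :=
  let height : Int := m.length
  let active : Bool := decide (l ≥ height - l - 1)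
  (PySem.List.pyRange 0 l 1).map (fun r =>
    (PySem.List.pyRange 0 (((PySem.List.pyGetD m 0 []).length : Int)) 1).map (fun x =>
      if PySem.List.pyGetD (PySem.List.pyGetD m r []) x "" = "#" ∨
         (active = true ∧ 2*l - r ≤ height - 1 ∧
          PySem.List.pyGetD (PySem.List.pyGetD m (2*l - r) []) x "" = "#")
      then "#"
      else PySem.List.pyGetD (PySem.List.pyGetD m r []) x ""))

-- ===== PRECONDITION & SPEC =====
-- Pre_ admits exactly the inputs where Python A returns without raising: the grid is nonempty
-- (else len(m[0]) raises), and — unless row 0 is empty, in which case no cell is ever indexed —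
-- l lies in [-len(m)-1, len(m)] (outside, A's row indexing raises IndexError) and every row
-- other than row l (which A never reads) is at least as long as row 0 (else IndexError).
def Pre_horizontal_fold (m : List (List String)) (l : Int) : Prop :=
  m ≠ [] ∧ ((m.headD []).length = 0 ∨
    (-(m.length : Int) - 1 ≤ l ∧ l ≤ (m.length : Int) ∧
     ∀ i < m.length, ((i : Int) = l ∨ (m.headD []).length ≤ (m.getD i []).length)))
instance (m : List (List String)) (l : Int) : Decidable (Pre_horizontal_fold m l) := by
  unfold Pre_horizontal_fold; infer_instance

def pvWitness_horizontal_fold : List (List String) × Int :=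
  ([["#", "."], [".", "."], [".", "#"]], 2)

def Spec_horizontal_fold (m : List (List String)) (l : Int) (out : List (List String)) : Prop := out = horizontal_fold_alt m l
instance (m : List (List String)) (l : Int) (out : List (List String)) : Decidable (Spec_horizontal_fold m l out) := by unfold Spec_horizontal_fold; infer_instance

-- ===== CLAIM (what is proved, stated in full; the proofs are below) =====
def Claim_equal_horizontal_fold : Prop := ∀ (m : List (List String)) (l : Int), Dom_horizontal_fold m l → Pre_horizontal_fold m l → Spec_horizontal_fold m l (horizontal_fold m l)

-- ===== LEMMAS AND PROOFS =====

def pvCell (m : List (List String)) (j x : Nat) : String := (m.getD j []).getD x ""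

theorem pv_rowfold_length (P : Nat → Prop) [DecidablePred P] :
    ∀ (k : Nat) (row : List String),
    ((List.range k).foldl (fun acc x => if P x then acc.set x "#" else acc) row).length = row.length := by
  intro k
  induction k with
  | zero => intro row; simp
  | succ k ih =>
    intro row
    rw [List.range_succ, List.foldl_append]
    by_cases hp : P k <;> simp [hp, ih]

theorem pv_rowfold (P : Nat → Prop) [DecidablePred P] :
    ∀ (k : Nat) (row : List String) (i : Nat),
    ((List.range k).foldl (fun acc x => if P x then acc.set x "#" else acc) row)[i]? =
      if i < k ∧ P i ∧ i < row.length then some "#" else row[i]? := by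
  intro k
  induction k with
  | zero => intro row i; simp
  | succ k ih =>
    intro row i
    rw [List.range_succ, List.foldl_append]
    have hlen := pv_rowfold_length P k row
    by_cases hp : P k
    · simp only [List.foldl_cons, List.foldl_nil, hp, if_pos]
      rw [List.getElem?_set]
      by_cases hki : k = i
      · subst hki
        by_cases hkr : k < row.length
        · simp [hlen, hkr, hp]
        · simp [hlen, hkr]
      · rw [if_neg hki, ih]
        have : (i < k ∧ P i ∧ i < row.length) ↔ (i < k + 1 ∧ P i ∧ i < row.length) := by
          constructor
          · rintro ⟨h1, h2, h3⟩; exact ⟨by omega, h2, h3⟩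
          · rintro ⟨h1, h2, h3⟩; exact ⟨by omega, h2, h3⟩
        simp only [this]
    · simp only [List.foldl_cons, List.foldl_nil, hp, if_false]
      rw [ih]
      have : (i < k ∧ P i ∧ i < row.length) ↔ (i < k + 1 ∧ P i ∧ i < row.length) := by
        constructor
        · rintro ⟨h1, h2, h3⟩; exact ⟨by omega, h2, h3⟩
        · rintro ⟨h1, h2, h3⟩
          refine ⟨?_, h2, h3⟩
          rcases Nat.lt_succ_iff_lt_or_eq.mp h1 with h | h
          · exact h
          · subst h; exact absurd h2 hp
      simp only [this]

theorem pv_inner_set (P : Nat → Prop) [DecidablePred P] (rn : Nat) :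
    ∀ (k : Nat) (acc : List (List String)), rn < acc.length →
    (List.range k).foldl (fun acc2 x => if P x then acc2.set rn ((acc2.getD rn []).set x "#") else acc2) acc
    = acc.set rn ((List.range k).foldl (fun row x => if P x then row.set x "#" else row) (acc.getD rn [])) := by
  intro k
  induction k with
  | zero =>
    intro acc h
    simp only [List.range_zero, List.foldl_nil]
    rw [List.getD_eq_getElem?_getD, List.getElem?_eq_getElem h]
    simp
  | succ k ih =>
    intro acc h
    rw [List.range_succ, List.foldl_append, List.foldl_append, ih acc h]
    have hget : ((acc.set rn ((List.range k).foldl (fun row x => if P x then row.set x "#" else row) (acc.getD rn []))).getD rn [])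
        = (List.range k).foldl (fun row x => if P x then row.set x "#" else row) (acc.getD rn []) := by
      rw [List.getD_eq_getElem?_getD, List.getElem?_set, if_pos rfl, if_pos h]
      rfl
    simp only [List.foldl_cons, List.foldl_nil]
    rw [hget]
    by_cases hp : P k
    · rw [if_pos hp, if_pos hp, List.set_set]
    · rw [if_neg hp, if_neg hp]

def pvState (m : List (List String)) (n w k : Nat) : List (List String) :=
  (List.range n).map (fun r => (List.range w).map (fun x =>
    if n ≤ k + r ∧ pvCell m (2*n - r) x = "#" then "#" else pvCell m r x))

theorem pv_state_length (m : List (List String)) (n w k : Nat) : (pvState m n w k).length = n := by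
  simp [pvState]

theorem pv_step (m : List (List String)) (n w k : Nat) (hk : k < n) :
    (List.range w).foldl
      (fun acc2 x => if pvCell m (n+1+k) x = "#" then acc2.set (n-1-k) ((acc2.getD (n-1-k) []).set x "#") else acc2)
      (pvState m n w k)
    = pvState m n w (k+1) := by
  rw [pv_inner_set _ (n-1-k) w (pvState m n w k) (by rw [pv_state_length]; omega)]
  have hrow : (pvState m n w k).getD (n-1-k) [] = (List.range w).map (fun x => pvCell m (n-1-k) x) := by
    unfold pvState
    rw [List.getD_eq_getElem?_getD, List.getElem?_map, List.getElem?_range (by omega)]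
    simp only [Option.map_some, Option.getD_some]
    apply List.map_congr_left
    intro x _
    rw [if_neg]
    rintro ⟨h1, -⟩
    omega
  rw [hrow]
  apply List.ext_getElem?
  intro r
  rw [List.getElem?_set]
  by_cases hr : n - 1 - k = r
  · subst hr
    rw [if_pos rfl, if_pos (by rw [pv_state_length]; omega)]
    unfold pvState
    rw [List.getElem?_map, List.getElem?_range (by omega)]
    simp only [Option.map_some]
    refine congrArg some ?_
    apply List.ext_getElem?
    intro i
    rw [pv_rowfold]
    rw [List.getElem?_map]
    by_cases hi : i < w
    · rw [List.getElem?_range hi]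
      simp only [Option.map_some, List.length_map, List.length_range]
      have h1 : 2*n - (n-1-k) = n+1+k := by omega
      have h2 : n ≤ (k+1) + (n-1-k) := by omega
      rw [List.getElem?_map, List.getElem?_range hi, Option.map_some, h1]
      by_cases hp : pvCell m (n+1+k) i = "#"
      · rw [if_pos ⟨hi, hp, hi⟩, if_pos ⟨h2, hp⟩]
      · rw [if_neg (by rintro ⟨-, hp', -⟩; exact hp hp'), if_neg (by rintro ⟨-, hp'⟩; exact hp hp')]
    · have hn1 : (List.range w)[i]? = none := by rw [List.getElem?_eq_none_iff]; simpa using hi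
      rw [hn1]
      simp only [Option.map_none, List.length_map, List.length_range]
      rw [if_neg (by rintro ⟨-, -, h3⟩; exact hi h3)]
      rw [List.getElem?_map, hn1, Option.map_none]
  · rw [if_neg hr]
    unfold pvState
    rw [List.getElem?_map, List.getElem?_map]
    by_cases hrn : r < n
    · rw [List.getElem?_range hrn]
      simp only [Option.map_some]
      refine congrArg some ?_
      apply List.map_congr_left
      intro x _
      refine if_congr (and_congr_left fun _ => ?_) rfl rfl
      omega
    · rw [List.getElem?_eq_none_iff.mpr (by simpa using hrn)]
      simp

theorem pv_outer (m : List (List String)) (n w : Nat) :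
    ∀ k, k ≤ n →
    (List.range k).foldl
      (fun acc y => (List.range w).foldl
        (fun acc2 x => if pvCell m (n+1+y) x = "#" then acc2.set (n-1-y) ((acc2.getD (n-1-y) []).set x "#") else acc2) acc)
      (pvState m n w 0)
    = pvState m n w k := by
  intro k
  induction k with
  | zero => intro _; rfl
  | succ k ih =>
    intro hk
    rw [List.range_succ, List.foldl_append, ih (by omega), List.foldl_cons, List.foldl_nil]
    exact pv_step m n w k (by omega)

theorem pv_A_nat (m : List (List String)) (n : Nat) :
    horizontal_fold m (n : Int) =
      if m.length - (n+1) ≤ n then pvState m n (m.getD 0 []).length (m.length - (n+1))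
      else pvState m n (m.getD 0 []).length 0 := by
  have hK : ((m.length : Int) - ((n:Int)+1)).toNat = m.length - (n+1) := by omega
  simp only [horizontal_fold, PySem.List.pyGetD_zero]
  have hm1 : List.map (fun j => List.map (fun i => PySem.List.pyGetD (PySem.List.pyGetD m j []) i "") (PySem.List.pyRange 0 ((m.getD 0 []).length:Int))) (PySem.List.pyRange 0 (n:Int))
      = pvState m n (m.getD 0 []).length 0 := by
    rw [PySem.List.pyRange_zero_nat n, List.map_map]
    unfold pvState
    apply List.map_congr_left
    intro r hr
    rw [List.mem_range] at hr
    simp only [Function.comp_apply]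
    rw [PySem.List.pyRange_zero_nat, List.map_map]
    apply List.map_congr_left
    intro x _
    simp only [Function.comp_apply, PySem.List.pyGetD_natCast]
    rw [if_neg (by rintro ⟨h1, -⟩; omega)]
    rfl
  rw [hm1, PySem.List.pyRange_one ((n:Int)+1) (m.length:Int), hK]
  simp only [List.length_map, List.length_range, pv_state_length]
  simp only [ge_iff_le]
  split_ifs with hguard
  · rw [PySem.List.pyRange_zero_nat (m.length - (n+1)), List.foldl_map]
    refine (PySem.List.foldl_congr_mem _ _ _ _ ?_).trans
      (pv_outer m n (m.getD 0 []).length (m.length - (n+1)) hguard)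
    intro acc y hy
    rw [List.mem_range] at hy
    rw [PySem.List.pyRange_zero_nat ((m.getD 0 []).length), List.foldl_map]
    apply PySem.List.foldl_congr_mem
    intro acc2 x hx
    rw [List.mem_range] at hx
    have hcast1 : ((n:Int) - (y:Int) - 1) = ((n-1-y : Nat) : Int) := by omega
    have hcast2 : ((n:Int) + 1 + (y:Int)) = ((n+1+y : Nat) : Int) := by push_cast; ring
    simp only [List.map_map, Function.comp_apply, hcast1, hcast2,
      PySem.List.pyGetD_natCast, PySem.List.pySetD_natCast,
      List.getD_eq_getElem?_getD, List.getElem?_map, List.getElem?_range hy,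
      Option.map_some, Option.getD_some]
    simp only [List.getD_eq_getElem?_getD] at hx
    simp only [List.getElem?_range hx, Option.map_some, Option.getD_some, Function.comp_apply,
      PySem.List.pyGetD_natCast, pvCell, List.getD_eq_getElem?_getD]
  · rfl

theorem pv_B_nat (m : List (List String)) (n : Nat) :
    horizontal_fold_alt m (n : Int) =
      if m.length - (n+1) ≤ n then pvState m n (m.getD 0 []).length (m.length - (n+1))
      else pvState m n (m.getD 0 []).length 0 := by
  simp only [horizontal_fold_alt, PySem.List.pyGetD_zero]
  rw [PySem.List.pyRange_zero_nat n, List.map_map]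
  split_ifs with hguard
  · have hact : decide ((n:Int) ≥ (m.length:Int) - (n:Int) - 1) = true := by
      simp only [decide_eq_true_eq, ge_iff_le]; omega
    unfold pvState
    apply List.map_congr_left
    intro r hr
    rw [List.mem_range] at hr
    simp only [Function.comp_apply]
    rw [PySem.List.pyRange_zero_nat ((m.getD 0 []).length), List.map_map]
    apply List.map_congr_left
    intro x _
    have hcast : (2*(n:Int) - (r:Int)) = ((2*n - r : Nat) : Int) := by omega
    simp only [Function.comp_apply, hact, hcast, PySem.List.pyGetD_natCast, pvCell, true_and]
    have hbound : ((2*n - r : Nat) : Int) ≤ (m.length:Int) - 1 ↔ n ≤ m.length - (n+1) + r := by omega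
    by_cases c1 : (m.getD r []).getD x "" = "#"
    · rw [if_pos (Or.inl c1)]
      by_cases c2 : n ≤ m.length - (n+1) + r ∧ (m.getD (2*n - r) []).getD x "" = "#"
      · rw [if_pos c2]
      · rw [if_neg c2, c1]
    · by_cases c2 : n ≤ m.length - (n+1) + r ∧ (m.getD (2*n - r) []).getD x "" = "#"
      · rw [if_pos (Or.inr ⟨hbound.mpr c2.1, c2.2⟩), if_pos c2]
      · rw [if_neg ?_, if_neg c2]
        rintro (h1 | ⟨h2, h3⟩)
        · exact c1 h1
        · exact c2 ⟨hbound.mp h2, h3⟩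
  · have hact : decide ((n:Int) ≥ (m.length:Int) - (n:Int) - 1) = false := by
      simp only [decide_eq_false_iff_not, ge_iff_le, not_le]; omega
    unfold pvState
    apply List.map_congr_left
    intro r hr
    rw [List.mem_range] at hr
    simp only [Function.comp_apply]
    rw [PySem.List.pyRange_zero_nat ((m.getD 0 []).length), List.map_map]
    apply List.map_congr_left
    intro x _
    simp only [Function.comp_apply, hact, PySem.List.pyGetD_natCast, pvCell, false_and, or_false,
      Bool.false_eq_true]
    by_cases c1 : (m.getD r []).getD x "" = "#"
    · rw [if_pos c1, if_neg (by rintro ⟨h1, -⟩; omega), c1]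
    · rw [if_neg c1, if_neg (by rintro ⟨h1, -⟩; omega)]

-- ===== VERDICT (by name: the statement is the Claim_ definition above) =====
theorem horizontal_fold_spec : Claim_equal_horizontal_fold := by
  intro m l _hdom hpre
  obtain ⟨hne, -⟩ := hpre
  unfold Spec_horizontal_fold
  rcases lt_or_ge l 0 with hneg | hge
  · have hlen : 0 < m.length := List.length_pos_of_ne_nil hne
    simp only [horizontal_fold, horizontal_fold_alt, PySem.List.pyGetD_zero]
    rw [PySem.List.pyRange_one_eq_nil (by omega : l ≤ 0), List.map_nil, List.map_nil]
    rw [if_neg (by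
      simp only [List.length_nil, List.length_map, PySem.List.length_pyRange_one, ge_iff_le,
        Nat.le_zero]
      omega)]
  · obtain ⟨n, rfl⟩ := Int.eq_ofNat_of_zero_le hge
    rw [pv_A_nat, pv_B_nat]
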